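-- pv_equiv track=rewrite | github.com/NathanLeroux-git/GainCellAttention | evaluation/eval_lambada_eval.py | remove_last_word
-- ===== SOURCE A (Python) =====
-- def remove_last_word(line):
--     line = line.strip()
--     words = line.replace("\n", " ").split(' ')
--     length_of_words = sum([len(w) for w in words[:-1]])
--     cutpos = length_of_words+len(words)-2
--     text = line[:cutpos]
--     target = line[cutpos:]
--     assert len(target) > 0
--     return text, target
-- ===== SOURCE B (Python) =====
-- def remove_last_word(line):
--     line = line.strip()
--     cutpos = line.replace("\n", " ").rfind(' ')
--     text = line[:cutpos]
--     target = line[cutpos:]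
--     assert len(target) > 0
--     return text, target
-- ===== Notes on version B (the rewrite author's own statement) =====
-- stated objective: simpler
-- what changed: Instead of splitting the line into a word list and summing the lengths of all but the last word, B finds the cut position directly as the rightmost space (after the same newline-to-space replacement) with rfind, which returns -1 exactly where A's arithmetic does.
import Mathlib
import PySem

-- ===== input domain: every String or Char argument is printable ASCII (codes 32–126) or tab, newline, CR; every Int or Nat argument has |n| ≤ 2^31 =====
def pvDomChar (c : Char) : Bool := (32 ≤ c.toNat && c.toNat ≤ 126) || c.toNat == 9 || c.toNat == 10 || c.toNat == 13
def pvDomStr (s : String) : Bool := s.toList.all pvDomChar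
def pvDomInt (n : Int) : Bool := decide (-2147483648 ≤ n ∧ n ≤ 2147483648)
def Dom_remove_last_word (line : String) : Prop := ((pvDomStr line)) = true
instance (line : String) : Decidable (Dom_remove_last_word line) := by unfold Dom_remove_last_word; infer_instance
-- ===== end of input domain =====

-- B computes the cut position as the rightmost space via rfind instead of splitting
-- into words and summing their lengths; same return value wherever A returns.

-- ===== PORT A =====
def remove_last_word (line : String) : String × String :=
  let line := PySem.Str.strip line
  let words := (PySem.Str.split? (PySem.Str.replace line "\n" " ") " ").getD []
  let length_of_words : Int :=
    ((PySem.List.slice words none (some (-1))).map (fun w => PySem.Str.len w)).sum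
  let cutpos : Int := length_of_words + (words.length : Int) - 2
  let text := PySem.Str.slice line none (some cutpos)
  let target := PySem.Str.slice line (some cutpos) none
  (text, target)

-- ===== PORT B =====
def remove_last_word_alt (line : String) : String × String :=
  let line := PySem.Str.strip line
  let cutpos : Int := PySem.Str.rfind (PySem.Str.replace line "\n" " ") " "
  let text := PySem.Str.slice line none (some cutpos)
  let target := PySem.Str.slice line (some cutpos) none
  (text, target)

-- ===== PRECONDITION & SPEC =====
-- Pre_ excludes exactly the inputs whose strip() is empty: there A's `assert len(target) > 0`
-- fails (AssertionError), so A returns no value.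
def Pre_remove_last_word (line : String) : Prop := PySem.Str.strip line ≠ ""
instance (line : String) : Decidable (Pre_remove_last_word line) := by
  unfold Pre_remove_last_word; infer_instance

def pvWitness_remove_last_word : String := "hello world"

def Spec_remove_last_word (line : String) (out : String × String) : Prop :=
  out = remove_last_word_alt line
instance (line : String) (out : String × String) : Decidable (Spec_remove_last_word line out) := by
  unfold Spec_remove_last_word; infer_instance

-- ===== CLAIM (what is proved, stated in full; the proofs are below) =====
def Claim_equal_remove_last_word : Prop :=
  ∀ (line : String), Dom_remove_last_word line → Pre_remove_last_word line →
    Spec_remove_last_word line (remove_last_word line)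

-- ===== LEMMAS AND PROOFS =====

-- Reference split on a single space, cons-recursive ("mySplit").
def mySplit : List Char → List (List Char)
  | [] => [[]]
  | c :: cs => if c = ' ' then [] :: mySplit cs
               else (c :: (mySplit cs).headI) :: (mySplit cs).tail

theorem mySplit_ne_nil (cs : List Char) : mySplit cs ≠ [] := by
  cases cs with
  | nil => simp [mySplit]
  | cons c cs => simp only [mySplit]; split <;> simp

theorem splitOn_go_eq (fuel : Nat) :
    ∀ (l cur : List Char) (acc : List (List Char)), l.length < fuel →
      PySem.Chars.splitOn.go [' '] fuel l cur acc =
        acc.reverse ++ (cur.reverse ++ (mySplit l).headI) :: (mySplit l).tail := by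
  induction fuel with
  | zero => intro l cur acc h; omega
  | succ n ih =>
    intro l cur acc h
    cases l with
    | nil => simp [PySem.Chars.splitOn.go, mySplit]
    | cons c rest =>
      rcases hm : mySplit rest with _ | ⟨w, ws⟩
      · exact absurd hm (mySplit_ne_nil rest)
      by_cases hc : c = ' '
      · subst hc
        simp only [PySem.Chars.splitOn.go, List.isPrefixOf, BEq.rfl, Bool.true_and, if_pos]
        rw [show List.drop [' '].length (' ' :: rest) = rest from rfl]
        rw [ih rest [] (cur.reverse :: acc) (by simpa using Nat.lt_of_succ_lt_succ h)]
        simp [mySplit, hm]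
      · have hpf : [' '].isPrefixOf (c :: rest) = false := by
          simp [List.isPrefixOf]; exact fun hh => absurd hh.symm hc
        simp only [PySem.Chars.splitOn.go, hpf, Bool.false_eq_true, if_false]
        rw [ih rest (c :: cur) acc (by simpa using Nat.lt_of_succ_lt_succ h)]
        simp [mySplit, hc, hm]

theorem splitOn_eq_mySplit (cs : List Char) :
    PySem.Chars.splitOn cs [' '] = mySplit cs := by
  unfold PySem.Chars.splitOn
  rw [splitOn_go_eq (cs.length + 1) cs [] [] (Nat.lt_succ_self _)]
  rcases hm : mySplit cs with _ | ⟨w, ws⟩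
  · exact absurd hm (mySplit_ne_nil cs)
  · simp

-- total length bookkeeping: sum of word lengths + number of words = length + 1
theorem mySplit_sum_len (cs : List Char) :
    ((mySplit cs).map List.length).sum + (mySplit cs).length = cs.length + 1 := by
  induction cs with
  | nil => simp [mySplit]
  | cons c cs ih =>
    rcases hm : mySplit cs with _ | ⟨w, ws⟩
    · exact absurd hm (mySplit_ne_nil cs)
    by_cases hc : c = ' '
    · simp only [mySplit, hc, hm] at *
      simp at ih ⊢; omega
    · simp only [mySplit, hc, hm] at *
      simp at ih ⊢; omega

-- snoc recurrences for mySplit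
theorem mySplit_snoc_space (s : List Char) :
    mySplit (s ++ [' ']) = mySplit s ++ [[]] := by
  induction s with
  | nil => simp [mySplit]
  | cons a s ih =>
    rcases hm : mySplit s with _ | ⟨w, ws⟩
    · exact absurd hm (mySplit_ne_nil s)
    by_cases ha : a = ' '
    · simp [mySplit, ha, ih]
    · simp [mySplit, ha, ih, hm]

theorem mySplit_snoc_ne (s : List Char) (c : Char) (hc : c ≠ ' ') :
    mySplit (s ++ [c]) =
      (mySplit s).dropLast ++ [(mySplit s).getLastD [] ++ [c]] := by
  induction s with
  | nil => simp [mySplit, hc]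
  | cons a s ih =>
    rcases hm : mySplit s with _ | ⟨y, ys⟩
    · exact absurd hm (mySplit_ne_nil s)
    by_cases ha : a = ' '
    · subst ha
      simp only [List.cons_append, mySplit, ih, hm]
      cases ys <;> simp
    · simp only [List.cons_append, mySplit, if_neg ha, ih, hm]
      cases ys with
      | nil => simp
      | cons y1 yt => simp

-- int-valued word-length sum equals the cast nat sum
theorem sum_len_int (l : List (List Char)) :
    (l.map (fun w => (w.length : Int))).sum = ((l.map List.length).sum : Nat) := by
  induction l with
  | nil => simp
  | cons w l ih => simp [ih]

-- A's cut position, as a function of the (replaced, stripped) character list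
def cutA (cs : List Char) : Int :=
  ((mySplit cs).dropLast.map (fun w => (w.length : Int))).sum + ((mySplit cs).length : Int) - 2

-- rfind: the `go` scanner ignores an appended char below the old length
theorem rfind_go_append (s : List Char) (c : Char) :
    ∀ j, j < s.length →
      PySem.Chars.rfind.go (s ++ [c]) [' '] j = PySem.Chars.rfind.go s [' '] j := by
  intro j
  induction j with
  | zero =>
    intro h
    rcases s with _ | ⟨x, t⟩
    · simp at h
    · simp [PySem.Chars.rfind.go, List.isPrefixOf]
  | succ j ih =>
    intro h
    have hd : List.drop (j + 1) (s ++ [c]) = List.drop (j + 1) s ++ [c] :=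
      List.drop_append_of_le_length (by omega)
    have hne : List.drop (j + 1) s ≠ [] := by
      intro hnil
      have := List.length_drop (l := s) (i := j + 1)
      rw [hnil] at this; simp at this; omega
    rcases hds : List.drop (j + 1) s with _ | ⟨x, t⟩
    · exact absurd hds hne
    · simp only [PySem.Chars.rfind.go, hd, hds, List.cons_append, List.isPrefixOf,
        Bool.and_true]
      rw [ih (by omega)]

theorem rfind_go_zero (s sub : List Char) :
    PySem.Chars.rfind.go s sub 0 = if sub.isPrefixOf s then 0 else -1 := by
  simp [PySem.Chars.rfind.go]

theorem rfind_go_succ (s sub : List Char) (j : Nat) :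
    PySem.Chars.rfind.go s sub (j + 1) =
      if sub.isPrefixOf (s.drop (j + 1)) then ((j + 1 : Nat) : Int)
      else PySem.Chars.rfind.go s sub j := by
  simp [PySem.Chars.rfind.go]

theorem rfind_snoc (s : List Char) (c : Char) :
    PySem.Chars.rfind (s ++ [c]) [' '] =
      if c = ' ' then (s.length : Int) else PySem.Chars.rfind s [' '] := by
  rcases s with _ | ⟨x, t⟩
  · by_cases hc : c = ' '
    · subst hc; decide
    · have hb : (' ' == c) = false := by rw [beq_eq_false_iff_ne]; exact fun h => hc h.symm
      rw [if_neg hc, show PySem.Chars.rfind [] [' '] = -1 from by decide]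
      unfold PySem.Chars.rfind
      rw [show (([] : List Char) ++ [c]).length = 0 + 1 from by simp,
        rfind_go_succ, rfind_go_zero,
        show List.drop (0 + 1) (([] : List Char) ++ [c]) = [] from by simp]
      simp [List.isPrefixOf, hb]
  · have hd1 : List.drop (t.length + 2) ((x :: t) ++ [c]) = [] := by
      apply List.drop_eq_nil_of_le; simp
    have hd2 : List.drop (t.length + 1) ((x :: t) ++ [c]) = [c] := by
      rw [List.drop_append_of_le_length (by simp)]
      simp [List.drop_eq_nil_of_le]
    have hd3 : List.drop (t.length + 1) (x :: t) = [] := by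
      apply List.drop_eq_nil_of_le; simp
    unfold PySem.Chars.rfind
    have hlen : ((x :: t) ++ [c]).length = (t.length + 1) + 1 := by simp
    rw [hlen, rfind_go_succ, hd1]
    simp only [List.isPrefixOf, Bool.false_eq_true, if_false]
    rw [rfind_go_succ, hd2]
    simp only [List.length_cons]
    rw [rfind_go_succ (x :: t) [' '] t.length, hd3]
    simp only [List.isPrefixOf, Bool.false_eq_true, if_false, Bool.and_true]
    by_cases hc : c = ' '
    · subst hc
      rw [if_pos (by decide), if_pos rfl]
    · have hb : (' ' == c) = false := by rw [beq_eq_false_iff_ne]; exact fun h => hc h.symm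
      rw [hb]
      simp only [Bool.false_eq_true, if_false]
      rw [rfind_go_append (x :: t) c t.length (by simp), if_neg hc]

theorem cutA_eq_rfind (cs : List Char) :
    cutA cs = PySem.Chars.rfind cs [' '] := by
  induction cs using List.reverseRecOn with
  | nil => simp [cutA, mySplit, PySem.Chars.rfind, PySem.Chars.rfind.go, List.isPrefixOf]
  | append_singleton s c ih =>
    rw [rfind_snoc]
    by_cases hc : c = ' '
    · subst hc
      rw [if_pos rfl]
      unfold cutA
      rw [mySplit_snoc_space, List.dropLast_concat, List.length_append, sum_len_int]
      have h := mySplit_sum_len s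
      simp only [List.length_cons, List.length_nil]
      omega
    · rw [if_neg hc, ← ih]
      unfold cutA
      rw [mySplit_snoc_ne s c hc, List.dropLast_concat, List.length_append]
      have h1 : (mySplit s).dropLast.length + 1 = (mySplit s).length := by
        rcases hm : mySplit s with _ | ⟨w, ws⟩
        · exact absurd hm (mySplit_ne_nil s)
        · simp
      simp only [List.length_cons, List.length_nil]
      omega

theorem cut_str (s2 : String) :
    ((PySem.List.slice ((PySem.Str.split? s2 " ").getD []) none (some (-1))).map
        (fun w => PySem.Str.len w)).sum
      + ((((PySem.Str.split? s2 " ").getD []).length : Int)) - 2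
    = PySem.Str.rfind s2 " " := by
  have hsplit : PySem.Str.split? s2 " "
      = some ((PySem.Chars.splitOn s2.toList [' ']).map String.ofList) := by
    unfold PySem.Str.split? PySem.Chars.split?
    simp
  rw [hsplit, PySem.Str.rfind_eq, show (" " : String).toList = [' '] from rfl,
    splitOn_eq_mySplit, ← cutA_eq_rfind]
  unfold cutA
  simp only [Option.getD_some]
  rw [PySem.List.slice_to_neg_one, ← List.map_dropLast]
  simp only [List.map_map, List.length_map]
  have hlen : (fun w => PySem.Str.len w) ∘ String.ofList
      = fun w : List Char => (w.length : Int) := by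
    funext w
    simp [PySem.Str.len]
  rw [hlen]

-- ===== VERDICT (by name: the statement is the Claim_ definition above) =====
theorem remove_last_word_spec : Claim_equal_remove_last_word := by
  intro line _ _
  unfold Spec_remove_last_word
  simp only [remove_last_word, remove_last_word_alt]
  rw [cut_str]
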